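-- pv_equiv track=rewrite | github.com/l1dge/100DaysofCode | day027.py | contains_any_py_chars
-- ===== SOURCE A (Python) =====
-- PYTHON = "python"
--
-- def contains_any_py_chars(input_str):
--     """Receives input string and checks if any of the PYTHON
--     chars are in it. Match is case insensitive."""
--     words = [word for word in input_str.lower()]
--     for letter in words:
--         if letter not in PYTHON:
--             pass
--         else:
--             return True
--     return False
-- ===== SOURCE B (Python) =====
-- PYTHON = "python"
--
-- def contains_any_py_chars(input_str):
--     """Set-intersection re-implementation: nonempty overlap of lowered chars with PYTHON."""
--     return bool(set(input_str.lower()) & set(PYTHON))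
-- ===== Notes on version B (the rewrite author's own statement) =====
-- stated objective: idiomatic
-- what changed: Replaced the explicit early-return scan over each lowered character with building the set of lowered characters once and testing its intersection with the set of PYTHON characters for non-emptiness.
import Mathlib
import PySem

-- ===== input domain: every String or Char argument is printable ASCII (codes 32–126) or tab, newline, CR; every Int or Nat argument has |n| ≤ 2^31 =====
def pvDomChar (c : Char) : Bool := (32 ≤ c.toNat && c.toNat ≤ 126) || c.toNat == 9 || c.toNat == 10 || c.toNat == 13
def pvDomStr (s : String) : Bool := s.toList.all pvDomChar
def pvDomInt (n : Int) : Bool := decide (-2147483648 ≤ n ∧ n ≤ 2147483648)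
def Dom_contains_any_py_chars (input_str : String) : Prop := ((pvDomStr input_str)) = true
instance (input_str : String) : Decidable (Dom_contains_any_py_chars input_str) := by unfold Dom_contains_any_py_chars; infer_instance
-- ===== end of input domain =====

-- B replaces A's early-return character scan with a single set intersection (idiomatic); same return value.

-- ===== PORT A =====
def pyPYTHON : String := "python"

-- the 'for letter in words: if letter not in PYTHON: pass else: return True / return False' loop
def pvLoopA : List Char → Bool
  | [] => false
  | letter :: rest =>
    if !(pyPYTHON.toList.contains letter) then pvLoopA rest else true

def contains_any_py_chars (input_str : String) : Bool :=
  let words := (PySem.Str.lower input_str).toList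
  pvLoopA words

-- ===== PORT B =====
def contains_any_py_chars_alt (input_str : String) : Bool :=
  !(PySem.Set.inter (PySem.Set.ofList (PySem.Str.lower input_str).toList)
      (PySem.Set.ofList pyPYTHON.toList)).isEmpty

-- ===== PRECONDITION & SPEC =====
def Spec_contains_any_py_chars (input_str : String) (out : Bool) : Prop := out = contains_any_py_chars_alt input_str
instance (input_str : String) (out : Bool) : Decidable (Spec_contains_any_py_chars input_str out) := by unfold Spec_contains_any_py_chars; infer_instance

-- ===== CLAIM (what is proved, stated in full; the proofs are below) =====
def Claim_equal_contains_any_py_chars : Prop := ∀ (input_str : String), Dom_contains_any_py_chars input_str → Spec_contains_any_py_chars input_str (contains_any_py_chars input_str)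

-- ===== LEMMAS AND PROOFS =====

lemma pvLoopA_eq_any (l : List Char) : pvLoopA l = l.any (fun c => pyPYTHON.toList.contains c) := by
  induction l with
  | nil => rfl
  | cons c rest ih =>
    simp only [pvLoopA, List.any_cons, ih]
    cases pyPYTHON.toList.contains c <;> simp

lemma pvAlt_eq_any (l : List Char) :
    (!(PySem.Set.inter (PySem.Set.ofList l) (PySem.Set.ofList pyPYTHON.toList)).isEmpty)
      = l.any (fun c => pyPYTHON.toList.contains c) := by
  rcases h : (PySem.Set.inter (PySem.Set.ofList l) (PySem.Set.ofList pyPYTHON.toList)).isEmpty with _ | _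
  · -- intersection nonempty → some element of l lies in pyPYTHON
    rw [List.isEmpty_eq_false_iff_exists_mem] at h
    obtain ⟨x, hx⟩ := h
    have hx' := (PySem.Set.mem_inter (s := PySem.Set.ofList l)
      (t := PySem.Set.ofList pyPYTHON.toList) (y := x)).mp hx
    simp only [PySem.Set.mem_ofList] at hx'
    symm
    rw [Bool.not_false, List.any_eq_true]
    exact ⟨x, hx'.1, by simpa using hx'.2⟩
  · -- intersection empty → no element of l lies in pyPYTHON
    rw [List.isEmpty_iff] at h
    symm
    rw [Bool.not_true, List.any_eq_false]
    intro c hc hcp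
    have hcmem : c ∈ PySem.Set.inter (PySem.Set.ofList l) (PySem.Set.ofList pyPYTHON.toList) :=
      (PySem.Set.mem_inter _ _ _).mpr ⟨(PySem.Set.mem_ofList _ _).mpr hc,
        (PySem.Set.mem_ofList _ _).mpr (by simpa using hcp)⟩
    simp [h] at hcmem

-- ===== VERDICT (by name: the statement is the Claim_ definition above) =====
theorem contains_any_py_chars_spec : Claim_equal_contains_any_py_chars := by
  intro s _
  unfold Spec_contains_any_py_chars contains_any_py_chars contains_any_py_chars_alt
  rw [pvLoopA_eq_any, pvAlt_eq_any]
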